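-- pv_equiv track=rewrite | github.com/leideng/CANN-8.1.RC1 | Ascend/ascend-toolkit/8.1.RC1/python/site-packages/analysis/mscalculate/stars/ffts_pmu_calculator.py | _get_group_number
-- ===== SOURCE A (Python) =====
-- def _get_group_number(number: int, group_size_list: list) -> int:
--     """
--     得到block pmu数据分组的编号
--     主要针对静态图场景，以及走路径五（aclnn）场景下，Task Type为MIX_AIV类型算子的mix_block_dim为0的情况
--     Input:
--     number: 同一个key下，该条block pmu数据为第几条被上报的数据
--     group_size_list: 包含每组数据大小的列表
--     Output:
--     group_number: 该条block pmu数据应该被分到第几组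
--     """
--     group_count = len(group_size_list)
--     # 主要针对静态图场景
--     if group_count == 1 and group_size_list[0] != 0:
--         return number // group_size_list[0]
--     for i in range(group_count):
--         # 通过前缀和来判断当前索引所对应的数据应该被分到第几组，如果group_size_list中包含0则通过前缀和跳过
--         if number < sum(group_size_list[:i + 1]):
--             return i
--     return group_count - 1
-- ===== SOURCE B (Python) =====
-- def _get_group_number(number: int, group_size_list: list) -> int:
--     if len(group_size_list) == 1:
--         g = group_size_list[0]
--         return _locate(number, group_size_list) if g == 0 else number // g
--     return _locate(number, group_size_list)
--
--
-- def _locate(remaining, sizes):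
--     """Walk the sizes once, subtracting each group's size from the remaining
--     count; the group whose size is not fully consumed is the answer."""
--     idx = 0
--     for s in sizes:
--         if remaining < s:
--             return idx
--         remaining -= s
--         idx += 1
--     return idx - 1
-- ===== Notes on version B (the rewrite author's own statement) =====
-- stated objective: faster
-- what changed: B walks the list once subtracting each group size from the remaining count (no prefix sums at all), instead of re-summing the slice group_size_list[:i+1] at every index; the single-group fast path is a pattern match on the list shape.
import Mathlib
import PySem

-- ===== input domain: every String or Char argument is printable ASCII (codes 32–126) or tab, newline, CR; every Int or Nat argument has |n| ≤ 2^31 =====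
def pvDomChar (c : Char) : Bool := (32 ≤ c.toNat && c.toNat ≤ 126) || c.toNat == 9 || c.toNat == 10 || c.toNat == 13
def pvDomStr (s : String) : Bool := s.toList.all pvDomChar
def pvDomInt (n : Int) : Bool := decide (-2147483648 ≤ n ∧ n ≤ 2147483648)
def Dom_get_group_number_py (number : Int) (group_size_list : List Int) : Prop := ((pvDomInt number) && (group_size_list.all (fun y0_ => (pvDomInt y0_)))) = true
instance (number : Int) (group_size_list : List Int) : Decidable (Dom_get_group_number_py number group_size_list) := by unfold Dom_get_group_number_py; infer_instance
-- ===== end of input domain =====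

-- ===== PORT A =====
-- B replaces A's per-index slice-and-sum test with one subtracting pass (O(n^2) -> O(n)).
-- A: for i in range(len(l)): if number < sum(l[:i+1]): return i; after the loop return len-1.
-- sum(l[:i+1]) is exact as (l.take (i+1)).sum since the slice bound i+1 is nonnegative.
def pvALoop (number : Int) (l : List Int) : List Nat → Int
  | [] => (l.length : Int) - 1
  | i :: rest => if number < (l.take (i + 1)).sum then (i : Int) else pvALoop number l rest

def get_group_number_py (number : Int) (group_size_list : List Int) : Int :=
  if group_size_list.length = 1 ∧ group_size_list.headD 0 ≠ 0 then
    PySem.Int.floordiv number (group_size_list.headD 0)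
  else
    pvALoop number group_size_list (List.range group_size_list.length)

-- ===== PORT B =====
-- _locate: subtract each size from the remaining count; first size not fully consumed wins.
def pvLocate (remaining : Int) (idx : Int) : List Int → Int
  | [] => idx - 1
  | s :: rest => if remaining < s then idx else pvLocate (remaining - s) (idx + 1) rest

def get_group_number_py_alt (number : Int) (group_size_list : List Int) : Int :=
  match group_size_list with
  | [g] => if g == 0 then pvLocate number 0 [g] else PySem.Int.floordiv number g
  | l => pvLocate number 0 l

-- ===== PRECONDITION & SPEC =====
def Spec_get_group_number_py (number : Int) (group_size_list : List Int) (out : Int) : Prop := out = get_group_number_py_alt number group_size_list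
instance (number : Int) (group_size_list : List Int) (out : Int) : Decidable (Spec_get_group_number_py number group_size_list out) := by unfold Spec_get_group_number_py; infer_instance

-- ===== CLAIM (what is proved, stated in full; the proofs are below) =====
def Claim_equal_get_group_number_py : Prop := ∀ (number : Int) (group_size_list : List Int), Dom_get_group_number_py number group_size_list → Spec_get_group_number_py number group_size_list (get_group_number_py number group_size_list)

-- ===== LEMMAS AND PROOFS =====
theorem pv_loop_eq (number : Int) (pre suf : List Int) :
    pvALoop number (pre ++ suf) (List.range' pre.length suf.length) =
      pvLocate (number - pre.sum) (pre.length : Int) suf := by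
  induction suf generalizing pre with
  | nil => simp [pvALoop, pvLocate]
  | cons s rest ih =>
    have hr : List.range' pre.length (s :: rest).length =
        pre.length :: List.range' (pre ++ [s]).length rest.length := by
      simp [List.range'_succ]
    have htake : ((pre ++ s :: rest).take (pre.length + 1)).sum = pre.sum + s := by
      have : (pre ++ s :: rest).take (pre.length + 1) = pre ++ [s] := by
        rw [List.take_append]; simp
      simp [this]
    have ih' := ih (pre ++ [s])
    simp only [List.append_assoc, List.cons_append, List.nil_append] at ih'
    rw [hr]
    simp only [pvALoop, pvLocate, htake, ih']
    by_cases h : number < pre.sum + s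
    · simp [h, show number - pre.sum < s by omega]
    · have hc : ((pre ++ [s]).length : Int) = (pre.length : Int) + 1 := by push_cast; simp
      have hs : number - (pre.sum + s) = number - pre.sum - s := by omega
      simp [h, show ¬ (number - pre.sum < s) by omega, hc, hs]

theorem pv_loop_zero (number : Int) (l : List Int) :
    pvALoop number l (List.range l.length) = pvLocate number 0 l := by
  have := pv_loop_eq number [] l
  simpa [List.range_eq_range'] using this

theorem get_group_number_py_spec : Claim_equal_get_group_number_py := by
  intro number l _
  show get_group_number_py number l = get_group_number_py_alt number l
  unfold get_group_number_py get_group_number_py_alt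
  match l with
  | [] => simp [pvALoop, pvLocate]
  | [g] =>
    by_cases hg : g = 0
    · subst hg
      simp [pvALoop, pvLocate, show List.range 1 = [0] from rfl]
    · simp [hg]
  | a :: b :: t =>
    have : ¬ ((a :: b :: t).length = 1 ∧ (a :: b :: t).headD 0 ≠ 0) := by simp
    simp only [this, if_false]
    exact pv_loop_zero number (a :: b :: t)
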